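-- pv_equiv track=rewrite | github.com/hachazo/Proyecto-Final-POO | src/controller/Formaciones.PY | obtener_diccionario_jugadores
-- ===== SOURCE A (Python) =====
-- def obtener_diccionario_jugadores(matriz, jugadores):
--     diccionario_jugadores = {}
--     jugador_index = 0
--     for i in range(len(matriz)):
--         for j in range(len(matriz[i])):
--             if matriz[i][j] == 1:
--                 diccionario_jugadores[(i, j)] = jugadores[jugador_index]
--                 jugador_index += 1
--     return diccionario_jugadores
-- ===== SOURCE B (Python) =====
-- def obtener_diccionario_jugadores(matriz, jugadores):
--     # Stateless closed-form rank: each 1-cell independently computes which player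
--     # it gets as (# of 1s in earlier rows, read off a per-row count table)
--     # + (# of 1s earlier in its own row); no running counter, no dict mutation.
--     counts = [fila.count(1) for fila in matriz]
--     return {(i, j): jugadores[sum(counts[:i]) + fila[:j].count(1)]
--             for i, fila in enumerate(matriz)
--             for j, v in enumerate(fila) if v == 1}
-- ===== Notes on version B (the rewrite author's own statement) =====
-- stated objective: alternative
-- what changed: Replaces A's stateful scan (a running player counter feeding dict insertions) by a stateless closed-form rank: a per-row 1-count table is built first, then every 1-cell independently indexes the player list by sum(counts[:i]) + fila[:j].count(1), so no state flows between cells.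
import Mathlib
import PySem

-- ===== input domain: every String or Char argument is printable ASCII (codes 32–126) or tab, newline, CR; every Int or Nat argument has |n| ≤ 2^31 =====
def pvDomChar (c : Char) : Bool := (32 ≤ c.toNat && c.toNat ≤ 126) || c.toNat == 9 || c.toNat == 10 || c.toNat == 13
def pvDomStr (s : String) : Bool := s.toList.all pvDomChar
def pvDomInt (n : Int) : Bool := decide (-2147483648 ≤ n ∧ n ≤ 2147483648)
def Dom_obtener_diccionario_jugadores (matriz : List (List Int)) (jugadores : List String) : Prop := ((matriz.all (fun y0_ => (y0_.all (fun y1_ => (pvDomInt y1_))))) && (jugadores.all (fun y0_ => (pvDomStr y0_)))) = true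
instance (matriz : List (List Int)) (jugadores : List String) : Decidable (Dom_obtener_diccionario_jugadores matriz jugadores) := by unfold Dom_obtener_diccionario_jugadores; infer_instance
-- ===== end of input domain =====

-- B replaces A's stateful scan (running player counter + dict mutation) by a stateless
-- closed-form rank: each 1-cell independently indexes the player list by
-- (# of 1s in earlier rows, read from a per-row count table) + (# of 1s earlier in its
-- own row) (objective: alternative).

-- ===== PORT A =====
-- Transliteration of A's nested `for i in range(len(matriz)) / for j in range(len(matriz[i]))`
-- loops over a (dict, jugador_index) state.  `jugadores[jugador_index]` is `pyGetD … ""`: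
-- Pre_ guarantees the index is always in range, so the default is never taken (outside Pre_
-- the Python raises IndexError and nothing is claimed).
def obtener_diccionario_jugadores (matriz : List (List Int)) (jugadores : List String) : List (Int × Int × String) :=
  ((PySem.List.pyRange 0 (matriz.length : Int) 1).foldl
      (fun (st : PySem.Dict (Int × Int) String × Int) i =>
        (PySem.List.pyRange 0 ((PySem.List.pyGetD matriz i []).length : Int) 1).foldl
          (fun st j =>
            if PySem.List.pyGetD (PySem.List.pyGetD matriz i []) j 0 = 1 then
              (st.1.insert (i, j) (PySem.List.pyGetD jugadores st.2 ""), st.2 + 1)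
            else st)
          st)
      (PySem.Dict.empty, (0 : Int))).1.items.map (fun p => (p.1.1, p.1.2, p.2))

-- ===== PORT B =====
-- Transliteration of Source B: `counts = [fila.count(1) for fila in matriz]`, then the dict
-- comprehension (enumerate/flatMap/filterMap building the key-value list in row-major
-- order, PySem.Dict.ofList) whose value is `jugadores[sum(counts[:i]) + fila[:j].count(1)]`
-- (`pyGetD … ""`: in range under Pre_, outside it the Python raises IndexError).
def obtener_diccionario_jugadores_alt (matriz : List (List Int)) (jugadores : List String) : List (Int × Int × String) :=
  let counts : List Int := matriz.map (fun fila => (fila.count 1 : Int))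
  (PySem.Dict.ofList
    ((PySem.List.enumerate matriz 0).flatMap (fun p =>
      (PySem.List.enumerate p.2 0).filterMap (fun q =>
        if q.2 = 1 then
          some ((p.1, q.1),
            PySem.List.pyGetD jugadores
              ((PySem.List.slice counts none (some p.1)).sum
                + ((PySem.List.slice p.2 none (some q.1)).count 1 : Int)) "")
        else none)))).items.map (fun p => (p.1.1, p.1.2, p.2))

-- ===== PRECONDITION & SPEC =====
-- Pre_ excludes exactly the inputs on which A raises IndexError: matrices with more 1-cells
-- than there are players.
def Pre_obtener_diccionario_jugadores (matriz : List (List Int)) (jugadores : List String) : Prop :=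
  (matriz.map (fun fila => fila.countP (fun v => v == 1))).sum ≤ jugadores.length
instance (matriz : List (List Int)) (jugadores : List String) : Decidable (Pre_obtener_diccionario_jugadores matriz jugadores) := by unfold Pre_obtener_diccionario_jugadores; infer_instance
def pvWitness_obtener_diccionario_jugadores : List (List Int) × List String :=
  ([[1, 0, 2], [0, 1, 1]], ["a", "b", "c"])

def Spec_obtener_diccionario_jugadores (matriz : List (List Int)) (jugadores : List String) (out : List (Int × Int × String)) : Prop := out = obtener_diccionario_jugadores_alt matriz jugadores
instance (matriz : List (List Int)) (jugadores : List String) (out : List (Int × Int × String)) : Decidable (Spec_obtener_diccionario_jugadores matriz jugadores out) := by unfold Spec_obtener_diccionario_jugadores; infer_instance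

-- ===== CLAIM (what is proved, stated in full; the proofs are below) =====
def Claim_equal_obtener_diccionario_jugadores : Prop := ∀ (matriz : List (List Int)) (jugadores : List String), Dom_obtener_diccionario_jugadores matriz jugadores → Pre_obtener_diccionario_jugadores matriz jugadores → Spec_obtener_diccionario_jugadores matriz jugadores (obtener_diccionario_jugadores matriz jugadores)

-- ===== LEMMAS AND PROOFS =====

-- Proof-only abbreviations: the selection of 1-cells, A's loop body over the flattened
-- cell list, the flattened cell list itself, and B's position list (with a general start row).
def pvSel (c : (Int × Int) × Int) : Option (Int × Int) := if c.2 = 1 then some c.1 else none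

def pvBody (jug : List String) (st : PySem.Dict (Int × Int) String × Int) (c : (Int × Int) × Int) :
    PySem.Dict (Int × Int) String × Int :=
  if c.2 = 1 then (st.1.insert c.1 (PySem.List.pyGetD jug st.2 ""), st.2 + 1) else st

def pvCells (m : List (List Int)) (s : Int) : List ((Int × Int) × Int) :=
  (PySem.List.enumerate m s).flatMap
    (fun p => (PySem.List.enumerate p.2 0).map (fun q => ((p.1, q.1), q.2)))

def pvPos (m : List (List Int)) (s : Int) : List (Int × Int) :=
  (PySem.List.enumerate m s).flatMap
    (fun p => (PySem.List.enumerate p.2 0).filterMap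
      (fun q => if q.2 = 1 then some (p.1, q.1) else none))

theorem pv_filterMap_if {α β : Type} (l : List α) (p : α → Prop) [DecidablePred p] (g : α → β) :
    l.filterMap (fun x => if p x then some (g x) else none)
      = (l.filter (fun x => decide (p x))).map g := by
  induction l with
  | nil => rfl
  | cons x t ih =>
    by_cases h : p x <;> simp [h, ih]

theorem pv_rowpos_eq (i : Int) (row : List Int) :
    (PySem.List.enumerate row 0).filterMap (fun q => if q.2 = 1 then some (i, q.1) else none)
      = ((PySem.List.enumerate row 0).filter (fun q => decide (q.2 = 1))).map (fun q => (i, q.1)) :=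
  pv_filterMap_if _ (fun q : Int × Int => q.2 = 1) _

theorem pv_rowpos_nodup (i : Int) (row : List Int) :
    ((PySem.List.enumerate row 0).filterMap
      (fun q => if q.2 = 1 then some (i, q.1) else none)).Nodup := by
  rw [pv_rowpos_eq]
  have h1 : ((PySem.List.enumerate row 0).filter (fun q => decide (q.2 = 1))).Pairwise
      (fun p q => p.1 < q.1) := (PySem.List.pairwise_lt_enumerate row 0).filter _
  exact (List.pairwise_map (f := fun q : Int × Int => (i, q.1))).2
    (h1.imp (fun {a b} h => show (i, a.1) ≠ (i, b.1) by
      intro hc; exact absurd (congrArg Prod.snd hc) (by simpa using Int.ne_of_lt h)))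

theorem pv_rowpos_fst (i : Int) (row : List Int) :
    ∀ x ∈ (PySem.List.enumerate row 0).filterMap
      (fun q => if q.2 = 1 then some (i, q.1) else none), x.1 = i := by
  rw [pv_rowpos_eq]
  intro x hx
  rcases List.mem_map.1 hx with ⟨q, _, rfl⟩
  rfl

theorem pv_pos_fst_ge (m : List (List Int)) : ∀ (s : Int), ∀ x ∈ pvPos m s, s ≤ x.1 := by
  induction m with
  | nil => intro s x hx; simp [pvPos, PySem.List.enumerate_nil] at hx
  | cons row t ih =>
    intro s x hx
    rw [pvPos, PySem.List.enumerate_cons, List.flatMap_cons] at hx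
    rcases List.mem_append.1 hx with h | h
    · exact le_of_eq (pv_rowpos_fst s row x h).symm
    · have := ih (s + 1) x h
      omega

theorem pv_pos_nodup (m : List (List Int)) : ∀ (s : Int), (pvPos m s).Nodup := by
  induction m with
  | nil => intro s; simp [pvPos, PySem.List.enumerate_nil]
  | cons row t ih =>
    intro s
    rw [pvPos, PySem.List.enumerate_cons, List.flatMap_cons]
    refine (pv_rowpos_nodup s row).append (ih (s + 1)) ?_
    intro x hx hx'
    have h1 : x.1 = s := pv_rowpos_fst s row x hx
    have h2 : s + 1 ≤ x.1 := pv_pos_fst_ge t (s + 1) x hx'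
    omega

theorem pv_pos_length (m : List (List Int)) : ∀ (s : Int),
    (pvPos m s).length = (m.map (fun fila => fila.countP (fun v => v == 1))).sum := by
  induction m with
  | nil => intro s; simp [pvPos, PySem.List.enumerate_nil]
  | cons row t ih =>
    intro s
    rw [pvPos, PySem.List.enumerate_cons, List.flatMap_cons]
    have hrow : ((PySem.List.enumerate row 0).filterMap
        (fun q => if q.2 = 1 then some (s, q.1) else none)).length
        = row.countP (fun v => v == 1) := by
      rw [pv_rowpos_eq, List.length_map, ← List.countP_eq_length_filter]
      calc (PySem.List.enumerate row 0).countP (fun q => decide (q.2 = 1))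
          = ((PySem.List.enumerate row 0).map (fun x => x.2)).countP (fun v => decide (v = 1)) := by
            rw [List.countP_map]; rfl
        _ = row.countP (fun v => v == 1) := by
            rw [PySem.List.map_snd_enumerate]
            apply List.countP_congr; intro v _; simp
    rw [List.length_append, hrow,
      show ((PySem.List.enumerate t (s + 1)).flatMap
        (fun p => (PySem.List.enumerate p.2 0).filterMap
          (fun q => if q.2 = 1 then some (p.1, q.1) else none))) = pvPos t (s + 1) from rfl,
      ih (s + 1), List.map_cons, List.sum_cons]

theorem pv_cells_filterMap (m : List (List Int)) (s : Int) :
    (pvCells m s).filterMap pvSel = pvPos m s := by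
  rw [pvCells, pvPos, List.filterMap_flatMap]
  congr 1
  funext p
  rw [List.filterMap_map]
  rfl

theorem pv_foldA (jug : List String) (cs : List ((Int × Int) × Int)) :
    ∀ (d : PySem.Dict (Int × Int) String) (k : Nat),
    (∀ p ∈ cs.filterMap pvSel, d.contains p = false) →
    (cs.filterMap pvSel).Nodup →
    (cs.filterMap pvSel).length + k ≤ jug.length →
    (cs.foldl (pvBody jug) (d, (k : Int))).1.items
      = d.items ++ (cs.filterMap pvSel).zip (jug.drop k) := by
  induction cs with
  | nil => intro d k _ _ _; simp
  | cons c t ih =>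
    intro d k hf hnd hlen
    by_cases hv : c.2 = 1
    · have hsel : (c :: t).filterMap pvSel = c.1 :: t.filterMap pvSel := by
        simp [pvSel, hv]
      rw [hsel] at hf hnd hlen
      have hk : k < jug.length := by simp at hlen; omega
      have hget : PySem.List.pyGetD jug (k : Int) "" = jug[k] := by
        rw [PySem.List.pyGetD_natCast]; exact List.getD_eq_getElem _ _ hk
      have hfresh : d.contains c.1 = false := hf c.1 (List.mem_cons_self)
      have hstep : (c :: t).foldl (pvBody jug) (d, (k : Int))
          = t.foldl (pvBody jug) (d.insert c.1 jug[k], ((k + 1 : Nat) : Int)) := by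
        rw [List.foldl_cons]
        congr 1
        simp only [pvBody, hv, if_pos, hget]
        push_cast
        rfl
      rw [hstep, ih]
      · rw [PySem.Dict.items_insert_of_not_contains _ _ hfresh, hsel,
          List.drop_eq_getElem_cons hk, List.zip_cons_cons, List.append_assoc,
          List.singleton_append]
      · intro p hp
        rw [PySem.Dict.contains_insert]
        have hne : p ≠ c.1 := fun h => (List.nodup_cons.1 hnd).1 (h ▸ hp)
        simp [hne, hf p (List.mem_cons_of_mem _ hp)]
      · exact (List.nodup_cons.1 hnd).2
      · simp at hlen ⊢; omega
    · have hsel : (c :: t).filterMap pvSel = t.filterMap pvSel := by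
        simp [pvSel, hv]
      rw [hsel] at hf hnd hlen
      rw [List.foldl_cons, hsel,
        show pvBody jug (d, (k : Int)) c = (d, (k : Int)) by simp [pvBody, hv]]
      exact ih d k hf hnd hlen

-- A's nested pyRange loops are the single foldl of pvBody over the flattened cell list.
theorem pv_loops_eq (m : List (List Int)) (jug : List String)
    (init : PySem.Dict (Int × Int) String × Int) :
    (PySem.List.pyRange 0 (m.length : Int) 1).foldl
      (fun st i =>
        (PySem.List.pyRange 0 ((PySem.List.pyGetD m i []).length : Int) 1).foldl
          (fun st j =>
            if PySem.List.pyGetD (PySem.List.pyGetD m i []) j 0 = 1 then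
              (st.1.insert (i, j) (PySem.List.pyGetD jug st.2 ""), st.2 + 1)
            else st)
          st)
      init
    = (pvCells m 0).foldl (pvBody jug) init := by
  rw [pvCells, List.foldl_flatMap, PySem.List.enumerate_eq_map_pyRange m ([] : List Int),
    List.foldl_map]
  simp only [PySem.List.len_eq]
  congr 1
  funext acc i
  rw [List.foldl_map, PySem.List.enumerate_eq_map_pyRange _ (0 : Int), List.foldl_map]
  simp only [PySem.List.len_eq]
  congr 1

theorem pv_A_as_cells (m : List (List Int)) (jug : List String) :
    obtener_diccionario_jugadores m jug
      = ((pvCells m 0).foldl (pvBody jug)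
          (PySem.Dict.empty, (0 : Int))).1.items.map (fun p => (p.1.1, p.1.2, p.2)) := by
  unfold obtener_diccionario_jugadores
  rw [pv_loops_eq]

-- ===== B-side lemmas: the rank formula picks the same players as a zip =====

-- One row of B's comprehension: walking `rest` (the part of the row from column
-- pre.length on), the value index S + (fila[:j].count 1) steps through jug from S + pre.count 1.
theorem pv_rowB (i : Int) (jug : List String) (S : Nat) :
    ∀ (rest pre : List Int),
    S + (pre ++ rest).count 1 ≤ jug.length →
    (PySem.List.enumerate rest (pre.length : Int)).filterMap
      (fun q => if q.2 = 1 then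
        some ((i, q.1),
          PySem.List.pyGetD jug
            ((S : Int) + ((PySem.List.slice (pre ++ rest) none (some q.1)).count 1 : Int)) "")
        else none)
    = ((PySem.List.enumerate rest (pre.length : Int)).filterMap
        (fun q => if q.2 = 1 then some (i, q.1) else none)).zip
      (jug.drop (S + pre.count 1)) := by
  intro rest
  induction rest with
  | nil => intro pre _; simp [PySem.List.enumerate_nil]
  | cons x rest' ih =>
    intro pre hlen
    have hslice : PySem.List.slice (pre ++ x :: rest') none (some (pre.length : Int))
        = pre := by
      rw [PySem.List.slice_to_natCast, List.take_left]
    have hlen' : ((pre.length : Int) + 1) = (((pre ++ [x]).length : Nat) : Int) := by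
      simp
    have happ : (pre ++ [x]) ++ rest' = pre ++ x :: rest' := by
      rw [List.append_assoc]; rfl
    rw [PySem.List.enumerate_cons, List.filterMap_cons, List.filterMap_cons]
    by_cases hx : x = 1
    · subst hx
      have hc1 : (pre ++ (1 : Int) :: rest').count 1 = pre.count 1 + 1 + rest'.count 1 := by
        simp [List.count_append]; omega
      rw [hc1] at hlen
      have hk : S + pre.count 1 < jug.length := by omega
      have hget : PySem.List.pyGetD jug
          ((S : Int) + ((PySem.List.slice (pre ++ (1 : Int) :: rest') none (some (pre.length : Int))).count 1 : Int)) ""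
          = jug[S + pre.count 1] := by
        rw [hslice, show (S : Int) + (pre.count 1 : Int) = ((S + pre.count 1 : Nat) : Int) by push_cast; ring,
          PySem.List.pyGetD_natCast]
        exact List.getD_eq_getElem _ _ hk
      have ihx := ih (pre ++ [(1 : Int)]) (by rw [happ]; omega)
      rw [← hlen'] at ihx
      rw [happ] at ihx
      have hcx : (pre ++ [(1 : Int)]).count 1 = pre.count 1 + 1 := by
        simp [List.count_append]
      rw [hcx] at ihx
      simp only [reduceIte]
      rw [hget, ihx, List.drop_eq_getElem_cons hk, List.zip_cons_cons]
      rfl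
    · have hcx : (pre ++ [x]).count 1 = pre.count 1 := by
        simp [List.count_append, hx]
      have ihx := ih (pre ++ [x]) (by rw [happ]; exact hlen)
      rw [← hlen'] at ihx
      rw [happ, hcx] at ihx
      simp only [hx, if_false]
      rw [ihx]

-- B's whole key-value list is the zip of the positions with the players.
theorem pv_B_zip (jug : List String) :
    ∀ (rest pre : List (List Int)) (full : List (List Int)),
    full = pre ++ rest →
    ((full.map (fun fila => fila.count 1)).sum : Nat) ≤ jug.length →
    (PySem.List.enumerate rest (pre.length : Int)).flatMap (fun p =>
      (PySem.List.enumerate p.2 0).filterMap (fun q =>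
        if q.2 = 1 then
          some ((p.1, q.1),
            PySem.List.pyGetD jug
              ((PySem.List.slice (full.map (fun fila => (fila.count 1 : Int))) none (some p.1)).sum
                + ((PySem.List.slice p.2 none (some q.1)).count 1 : Int)) "")
        else none))
    = (pvPos rest (pre.length : Int)).zip
        (jug.drop ((pre.map (fun fila => fila.count 1)).sum)) := by
  intro rest
  induction rest with
  | nil => intro pre full _ _; simp [PySem.List.enumerate_nil, pvPos]
  | cons fila rest' ih =>
    intro pre full hfull hlen
    subst hfull
    have hsum : ∀ l : List (List Int),
        (l.map (fun f => (f.count 1 : Int))).sum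
          = (((l.map (fun f => f.count 1)).sum : Nat) : Int) := by
      intro l; induction l with
      | nil => simp
      | cons h t iht => simp [iht]
    have hslice : PySem.List.slice ((pre ++ fila :: rest').map (fun f => (f.count 1 : Int)))
        none (some (pre.length : Int)) = pre.map (fun f => (f.count 1 : Int)) := by
      rw [List.map_append,
        show (pre.length : Int) = ((pre.map (fun f => (f.count 1 : Int))).length : Int) by simp,
        PySem.List.slice_to_natCast, List.take_left]
    have htot : (pre.map (fun f => f.count 1)).sum + fila.count 1
        + (rest'.map (fun f => f.count 1)).sum ≤ jug.length := by
      rw [List.map_append, List.sum_append, List.map_cons, List.sum_cons] at hlen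
      omega
    rw [PySem.List.enumerate_cons]
    simp only [List.flatMap_cons]
    have hrow := pv_rowB (pre.length : Int) jug ((pre.map (fun f => f.count 1)).sum) fila []
      (by rw [List.nil_append]; omega)
    simp only [List.nil_append, List.length_nil, Nat.cast_zero, List.count_nil, Nat.add_zero] at hrow
    have hihx := ih (pre ++ [fila]) (pre ++ fila :: rest')
      (by rw [List.append_assoc]; rfl) hlen
    have hlenx : (((pre ++ [fila]).length : Nat) : Int) = (pre.length : Int) + 1 := by simp
    rw [hlenx] at hihx
    have hsumx : ((pre ++ [fila]).map (fun f => f.count 1)).sum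
        = (pre.map (fun f => f.count 1)).sum + fila.count 1 := by
      simp [List.map_append]
    rw [hsumx] at hihx
    have hrl : ((PySem.List.enumerate fila 0).filterMap
        (fun q => if q.2 = 1 then some ((pre.length : Int), q.1) else none)).length
        = fila.count 1 := by
      rw [pv_rowpos_eq, List.length_map, ← List.countP_eq_length_filter]
      calc (PySem.List.enumerate fila 0).countP (fun q => decide (q.2 = 1))
          = ((PySem.List.enumerate fila 0).map (fun x => x.2)).countP (fun v => decide (v = 1)) := by
            rw [List.countP_map]; rfl
        _ = fila.count 1 := by
            rw [PySem.List.map_snd_enumerate]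
            show fila.countP (fun v => decide (v = 1)) = fila.countP (fun v => v == 1)
            apply List.countP_congr; intro v _; simp
    have hz : ∀ (a b : List (Int × Int)) (l : List String), a.length ≤ l.length →
        (a ++ b).zip l = a.zip l ++ b.zip (l.drop a.length) := by
      intro a
      induction a with
      | nil => intro b l _; simp
      | cons x t iht =>
        intro b l hle
        cases l with
        | nil => simp at hle
        | cons y l' =>
          simp only [List.cons_append, List.zip_cons_cons, List.length_cons, List.drop_succ_cons]
          rw [iht b l' (by simpa using hle)]
    have hpv : pvPos (fila :: rest') (pre.length : Int)
        = ((PySem.List.enumerate fila 0).filterMap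
            (fun q => if q.2 = 1 then some ((pre.length : Int), q.1) else none))
          ++ pvPos rest' ((pre.length : Int) + 1) := by
      rw [pvPos, PySem.List.enumerate_cons, List.flatMap_cons]; rfl
    rw [hpv, hz _ _ _ (by
        rw [hrl, List.length_drop]; omega),
      hrl, List.drop_drop]
    congr 1
    · rw [← hrow]
      simp only [hslice, hsum]

-- ===== VERDICT (by name: the statement is the Claim_ definition above) =====
theorem obtener_diccionario_jugadores_spec : Claim_equal_obtener_diccionario_jugadores := by
  intro m jug _ hpre
  unfold Spec_obtener_diccionario_jugadores
  have hcnt : (m.map (fun fila => fila.count 1)).sum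
      = (m.map (fun fila => fila.countP (fun v => v == 1))).sum := rfl
  have hlen : (pvPos m 0).length ≤ jug.length := by
    rw [pv_pos_length m 0]; exact hpre
  have hfa := pv_foldA jug (pvCells m 0) PySem.Dict.empty 0
    (fun p _ => PySem.Dict.contains_empty _)
    (by rw [pv_cells_filterMap]; exact pv_pos_nodup m 0)
    (by rw [pv_cells_filterMap]; simpa using hlen)
  rw [Nat.cast_zero] at hfa
  have hA : obtener_diccionario_jugadores m jug
      = ((pvPos m 0).zip jug).map (fun p => (p.1.1, p.1.2, p.2)) := by
    rw [pv_A_as_cells, hfa, pv_cells_filterMap,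
      show (PySem.Dict.empty : PySem.Dict (Int × Int) String).items = [] from rfl,
      List.drop_zero, List.nil_append]
  have hof : (PySem.Dict.ofList ((pvPos m 0).zip jug)).items = (pvPos m 0).zip jug := by
    have := PySem.Dict.items_foldl_insert_fresh (l := (pvPos m 0).zip jug)
      (k := Prod.fst) (v := Prod.snd) (d := PySem.Dict.empty)
      (fun a _ => PySem.Dict.contains_empty _)
      (by rw [List.map_fst_zip hlen]; exact pv_pos_nodup m 0)
    simpa using this
  have hz := pv_B_zip jug m [] m rfl (by rw [hcnt]; exact hpre)
  have hB : obtener_diccionario_jugadores_alt m jug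
      = ((pvPos m 0).zip jug).map (fun p => (p.1.1, p.1.2, p.2)) := by
    rw [show ((([] : List (List Int)).length : Int)) = (0 : Int) from rfl] at hz
    simp only [List.map_nil, List.sum_nil, List.drop_zero] at hz
    simp only [obtener_diccionario_jugadores_alt]
    rw [hz, hof]
  rw [hA, hB]
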